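-- pv_equiv track=rewrite | github.com/Manish98886/realityai-legal-bot | utils.py | format_evidence_list
-- ===== SOURCE A (Python) =====
-- def format_evidence_list(evidence: list, case_id: int) -> str:
--     """Format evidence checklist."""
--     if not evidence:
--         return f"📎 Case #{case_id} - No evidence items yet."
--     collected = sum(1 for e in evidence if e["status"] == "collected")
--     submitted = sum(1 for e in evidence if e["status"] == "submitted")
--     pending = sum(1 for e in evidence if e["status"] == "pending")
--     lines = [f"📎 **Evidence - Case #{case_id}**"]
--     lines.append(f"✅ Collected: {collected} | 📨 Submitted: {submitted} | ⏳ Pending: {pending}\n")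
--     for e in evidence:
--         status_emoji = {"collected": "✅", "submitted": "📨", "pending": "⏳"}.get(e["status"], "❓")
--         etype = f" [{e.get('item_type')}]" if e.get('item_type') else ""
--         notes = f" - {e['notes']}" if e.get('notes') else ""
--         lines.append(f"  {status_emoji} **#{e['id']}** {e['item_name']}{etype}{notes} ({e['status']})")
--     return "\n".join(lines)
-- ===== SOURCE B (Python) =====
-- def format_evidence_list(evidence: list, case_id: int) -> str:
--     """Format evidence checklist (single pass: tally counts and build item lines in one loop)."""
--     if not evidence:
--         return f"📎 Case #{case_id} - No evidence items yet."
--     emoji = {"collected": "✅", "submitted": "📨", "pending": "⏳"}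
--     counts = {"collected": 0, "submitted": 0, "pending": 0}
--     item_lines = []
--     for e in evidence:
--         status = e["status"]
--         if status in counts:
--             counts[status] += 1
--         etype = f" [{e['item_type']}]" if e.get('item_type') else ""
--         notes = f" - {e['notes']}" if e.get('notes') else ""
--         item_lines.append(f"  {emoji.get(status, '❓')} **#{e['id']}** {e['item_name']}{etype}{notes} ({status})")
--     header = [
--         f"📎 **Evidence - Case #{case_id}**",
--         f"✅ Collected: {counts['collected']} | 📨 Submitted: {counts['submitted']} | ⏳ Pending: {counts['pending']}\n",
--     ]
--     return "\n".join(header + item_lines)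
-- ===== Notes on version B (the rewrite author's own statement) =====
-- stated objective: alternative
-- what changed: Replaces A's three separate counting scans plus a line-building loop (four traversals of evidence) with a single traversal that tallies statuses in a counts dict and buffers the item lines, then assembles header + lines once.
import Mathlib
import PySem

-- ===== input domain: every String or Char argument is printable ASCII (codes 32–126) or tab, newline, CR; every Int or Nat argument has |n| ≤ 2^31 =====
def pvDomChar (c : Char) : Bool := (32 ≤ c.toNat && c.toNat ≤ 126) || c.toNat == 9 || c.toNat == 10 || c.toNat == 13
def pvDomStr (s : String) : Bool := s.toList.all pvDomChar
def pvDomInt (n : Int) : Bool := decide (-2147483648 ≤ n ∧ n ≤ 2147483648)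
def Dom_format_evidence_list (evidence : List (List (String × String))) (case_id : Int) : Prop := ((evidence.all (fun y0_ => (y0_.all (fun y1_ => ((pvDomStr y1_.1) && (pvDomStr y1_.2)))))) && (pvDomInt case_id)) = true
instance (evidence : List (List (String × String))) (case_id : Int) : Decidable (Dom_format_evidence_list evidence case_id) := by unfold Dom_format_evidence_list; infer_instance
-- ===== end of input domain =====

-- B makes ONE pass over evidence, tallying status counts in a dict while buffering the item
-- lines, instead of A's three separate counting scans followed by a line-building loop.


-- ===== PORT A =====
-- e[k] for the evidence dicts; `none` = Python KeyError, excluded by Pre_ below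
def pvLookup (e : List (String × String)) (k : String) : String :=
  ((PySem.Dict.mk e).get? k).getD ""

-- loop body of A's `for e in evidence` (one appended line per item)
def pvItemLineA (e : List (String × String)) : String :=
  let statusEmoji := ((PySem.Dict.mk [("collected", "✅"), ("submitted", "📨"), ("pending", "⏳")]).get? (pvLookup e "status")).getD "❓"
  let etype := match (PySem.Dict.mk e).get? "item_type" with
    | some s => if s = "" then "" else " [" ++ s ++ "]"      -- `if e.get('item_type')`: truthy = non-empty string
    | none => ""
  let notes := match (PySem.Dict.mk e).get? "notes" with
    | some s => if s = "" then "" else " - " ++ pvLookup e "notes"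
    | none => ""
  "  " ++ statusEmoji ++ " **#" ++ pvLookup e "id" ++ "** " ++ pvLookup e "item_name" ++ etype ++ notes ++ " (" ++ pvLookup e "status" ++ ")"

def format_evidence_list (evidence : List (List (String × String))) (case_id : Int) : String :=
  if evidence.isEmpty then
    "📎 Case #" ++ PySem.Int.toStr case_id ++ " - No evidence items yet."
  else
    let collected := evidence.foldl (fun acc e => if pvLookup e "status" = "collected" then acc + 1 else acc) (0 : Int)
    let submitted := evidence.foldl (fun acc e => if pvLookup e "status" = "submitted" then acc + 1 else acc) (0 : Int)
    let pending := evidence.foldl (fun acc e => if pvLookup e "status" = "pending" then acc + 1 else acc) (0 : Int)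
    let lines := ["📎 **Evidence - Case #" ++ PySem.Int.toStr case_id ++ "**",
      "✅ Collected: " ++ PySem.Int.toStr collected ++ " | 📨 Submitted: " ++ PySem.Int.toStr submitted ++ " | ⏳ Pending: " ++ PySem.Int.toStr pending ++ "\n"]
    let lines := evidence.foldl (fun ls e => ls ++ [pvItemLineA e]) lines
    PySem.Str.join "\n" lines

-- ===== PORT B =====
-- loop body of B's single pass: the formatted line for one item
def pvItemLineB (e : List (String × String)) : String :=
  let status := pvLookup e "status"
  let etype := match (PySem.Dict.mk e).get? "item_type" with
    | some s => if s = "" then "" else " [" ++ s ++ "]"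
    | none => ""
  let notes := match (PySem.Dict.mk e).get? "notes" with
    | some s => if s = "" then "" else " - " ++ s
    | none => ""
  "  " ++ ((PySem.Dict.mk [("collected", "✅"), ("submitted", "📨"), ("pending", "⏳")]).get? status).getD "❓" ++
    " **#" ++ pvLookup e "id" ++ "** " ++ pvLookup e "item_name" ++ etype ++ notes ++ " (" ++ status ++ ")"

-- one iteration of B's loop: tally the status (if it is a known one) and buffer the line
def pvStepB (st : PySem.Dict String Int × List String) (e : List (String × String)) :
    PySem.Dict String Int × List String :=
  let status := pvLookup e "status"
  let counts := if st.1.contains status then st.1.modify status 0 (· + 1) else st.1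
  (counts, st.2 ++ [pvItemLineB e])

def format_evidence_list_alt (evidence : List (List (String × String))) (case_id : Int) : String :=
  if evidence.isEmpty then
    "📎 Case #" ++ PySem.Int.toStr case_id ++ " - No evidence items yet."
  else
    let res := evidence.foldl pvStepB (PySem.Dict.mk [("collected", 0), ("submitted", 0), ("pending", 0)], [])
    let header := ["📎 **Evidence - Case #" ++ PySem.Int.toStr case_id ++ "**",
      "✅ Collected: " ++ PySem.Int.toStr (res.1.getD "collected" 0) ++ " | 📨 Submitted: " ++ PySem.Int.toStr (res.1.getD "submitted" 0) ++ " | ⏳ Pending: " ++ PySem.Int.toStr (res.1.getD "pending" 0) ++ "\n"]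
    PySem.Str.join "\n" (header ++ res.2)

-- ===== PRECONDITION & SPEC =====
-- Pre_ excludes exactly the inputs where Python A raises KeyError: a non-empty evidence list
-- containing an item without a "status", "id" or "item_name" key.
def Pre_format_evidence_list (evidence : List (List (String × String))) (case_id : Int) : Prop :=
  ∀ e ∈ evidence, (PySem.Dict.mk e).contains "status" = true ∧
    (PySem.Dict.mk e).contains "id" = true ∧ (PySem.Dict.mk e).contains "item_name" = true
instance (evidence : List (List (String × String))) (case_id : Int) : Decidable (Pre_format_evidence_list evidence case_id) := by unfold Pre_format_evidence_list; infer_instance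

def pvWitness_format_evidence_list : (List (List (String × String))) × Int :=
  ([[("status", "collected"), ("id", "1"), ("item_name", "contract")]], 7)

def Spec_format_evidence_list (evidence : List (List (String × String))) (case_id : Int) (out : String) : Prop := out = format_evidence_list_alt evidence case_id
instance (evidence : List (List (String × String))) (case_id : Int) (out : String) : Decidable (Spec_format_evidence_list evidence case_id out) := by unfold Spec_format_evidence_list; infer_instance

-- ===== CLAIM (what is proved, stated in full; the proofs are below) =====
def Claim_equal_format_evidence_list : Prop := ∀ (evidence : List (List (String × String))) (case_id : Int), Dom_format_evidence_list evidence case_id → Pre_format_evidence_list evidence case_id → Spec_format_evidence_list evidence case_id (format_evidence_list evidence case_id)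

-- ===== LEMMAS AND PROOFS =====
theorem pvItemLine_eq (e : List (String × String)) : pvItemLineA e = pvItemLineB e := by
  unfold pvItemLineA pvItemLineB
  cases h : (PySem.Dict.mk e).get? "notes" <;>
    simp [pvLookup, h]

-- B's fold splits into an independent counts fold and the buffered item lines
theorem pvFoldB_split (es : List (List (String × String))) (d : PySem.Dict String Int) (ls : List String) :
    es.foldl pvStepB (d, ls) =
      (es.foldl (fun d e =>
          if d.contains (pvLookup e "status") then d.modify (pvLookup e "status") 0 (· + 1) else d) d,
       ls ++ es.map pvItemLineB) := by
  induction es generalizing d ls with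
  | nil => simp
  | cons e es ih => simp [List.foldl_cons, pvStepB, ih]

-- the counts fold adds the number of matching statuses to any key the dict contains
theorem pvFoldCounts (key : String) (es : List (List (String × String))) (d : PySem.Dict String Int)
    (hk : d.contains key = true) :
    (es.foldl (fun d e =>
        if d.contains (pvLookup e "status") then d.modify (pvLookup e "status") 0 (· + 1) else d) d).getD key 0 =
      d.getD key 0 + ((es.countP (fun e => pvLookup e "status" = key) : Nat) : Int) := by
  induction es generalizing d with
  | nil => simp
  | cons e es ih =>
    simp only [List.foldl_cons, List.countP_cons]
    by_cases hs : pvLookup e "status" = key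
    · rw [hs, hk, if_pos rfl]
      rw [ih _ (by rw [PySem.Dict.contains_modify]; simp)]
      rw [PySem.Dict.getD_modify_self]
      simp
      omega
    · have h2 : ∀ d' : PySem.Dict String Int,
          (if d.contains (pvLookup e "status") then d.modify (pvLookup e "status") 0 (· + 1) else d) = d' →
          d'.contains key = true ∧ d'.getD key 0 = d.getD key 0 := by
        intro d' hd'
        split at hd' <;> subst hd'
        · constructor
          · rw [PySem.Dict.contains_modify]; simp [hk]
          · exact PySem.Dict.getD_modify_of_ne d 0 _ (fun h => hs h.symm)
        · exact ⟨hk, rfl⟩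
      obtain ⟨hc, hg⟩ := h2 _ rfl
      rw [ih _ hc, hg]
      simp [hs]

-- witness satisfies Dom and Pre
theorem pvWitness_ok : Dom_format_evidence_list pvWitness_format_evidence_list.1 pvWitness_format_evidence_list.2 ∧
    Pre_format_evidence_list pvWitness_format_evidence_list.1 pvWitness_format_evidence_list.2 := by
  constructor
  · decide
  · unfold Pre_format_evidence_list pvWitness_format_evidence_list; decide

-- ===== VERDICT (by name: the statement is the Claim_ definition above) =====
theorem format_evidence_list_spec : Claim_equal_format_evidence_list := by
  unfold Claim_equal_format_evidence_list
  intro evidence case_id _ _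
  unfold Spec_format_evidence_list format_evidence_list format_evidence_list_alt
  by_cases h : evidence.isEmpty
  · simp [h]
  · simp only [h, if_neg, Bool.false_eq_true, not_false_eq_true]
    rw [pvFoldB_split]
    rw [PySem.List.foldl_append_singleton_eq_map]
    have hmap : evidence.map pvItemLineA = evidence.map pvItemLineB :=
      List.map_congr_left (fun e _ => pvItemLine_eq e)
    rw [hmap]
    have hc : ∀ key : String, key = "collected" ∨ key = "submitted" ∨ key = "pending" →
        (evidence.foldl (fun d e =>
            if d.contains (pvLookup e "status") then d.modify (pvLookup e "status") 0 (· + 1) else d)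
          (PySem.Dict.mk [("collected", 0), ("submitted", 0), ("pending", 0)])).getD key 0 =
        evidence.foldl (fun acc e => if pvLookup e "status" = key then acc + 1 else acc) (0 : Int) := by
      intro key hkey
      have hfc := PySem.List.foldl_count_if (fun e => decide (pvLookup e "status" = key)) evidence 0
      simp only [decide_eq_true_eq] at hfc
      rw [hfc]
      rw [pvFoldCounts key evidence _ (by rcases hkey with h | h | h <;> subst h <;> decide)]
      have : (PySem.Dict.mk [("collected", 0), ("submitted", 0), ("pending", 0)]).getD key (0 : Int) = 0 := by
        rcases hkey with h | h | h <;> subst h <;> decide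
      rw [this]
    rw [hc "collected" (Or.inl rfl), hc "submitted" (Or.inr (Or.inl rfl)), hc "pending" (Or.inr (Or.inr rfl))]
    simp
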